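-- pv_equiv track=rewrite | github.com/eruvanos/2020_AOC | 04/solution.py | parse
-- ===== SOURCE A (Python) =====
-- def parse(lines):
--     passports = []
--     passport = {}
--     passports.append(passport)
--
--     for line in lines:
--         if len(line) == 0:
--             passport = {}
--             passports.append(passport)
--
--         for kv_pair in line.split():
--             key, value = kv_pair.split(":")
--             passport[key] = value
--
--     return passports
-- ===== SOURCE B (Python) =====
-- def parse(lines):
--     groups = [[]]
--     for line in lines:
--         if line:
--             groups[-1].append(line)
--         else:
--             groups.append([])
--     return [dict(tok.split(":") for line in g for tok in line.split()) for g in groups]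
-- ===== Notes on version B (the rewrite author's own statement) =====
-- stated objective: simpler
-- what changed: B first groups the lines into blank-separated blocks in one pass, then converts each block to a dict with a comprehension, instead of A's single pass that mutates the current dict aliased inside the growing result list.
import Mathlib
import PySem

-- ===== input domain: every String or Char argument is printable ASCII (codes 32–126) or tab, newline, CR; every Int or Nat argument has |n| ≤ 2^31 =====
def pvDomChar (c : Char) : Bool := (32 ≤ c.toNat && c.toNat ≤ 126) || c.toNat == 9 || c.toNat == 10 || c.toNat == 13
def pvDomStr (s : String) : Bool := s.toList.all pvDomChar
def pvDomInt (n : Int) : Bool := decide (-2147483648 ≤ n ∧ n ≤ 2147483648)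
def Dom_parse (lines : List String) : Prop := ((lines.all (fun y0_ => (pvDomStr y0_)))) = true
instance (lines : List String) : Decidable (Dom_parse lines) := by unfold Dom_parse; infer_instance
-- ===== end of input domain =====

-- B groups the lines into blank-separated blocks in one pass and then builds one dict per
-- block in a second pass; same return value as A, restructured for clarity (no speed claim).

-- ===== PORT A =====
-- key, value = kv_pair.split(":"); passport[key] = value
-- (on a token that does not split into exactly two parts Python raises ValueError;
--  such inputs are excluded by Pre_parse, here the step is a no-op)
def pvKvA (d : PySem.Dict String String) (kv_pair : String) : PySem.Dict String String :=
  match PySem.Str.split? kv_pair ":" with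
  | some [key, value] => d.insert key value
  | _ => d

-- state (st.1, st.2) models (passports minus the aliased last dict, passport)
def pvStepA (st : List (PySem.Dict String String) × PySem.Dict String String)
    (line : String) : List (PySem.Dict String String) × PySem.Dict String String :=
  let st := if PySem.Str.len line == 0 then (st.1 ++ [st.2], PySem.Dict.empty) else st
  (st.1, (PySem.Str.split₀ line).foldl pvKvA st.2)

def parse (lines : List String) : List (List (String × String)) :=
  let st := lines.foldl pvStepA ([], PySem.Dict.empty)
  (st.1 ++ [st.2]).map PySem.Dict.items

-- ===== PORT B =====
-- pass 1: groups = [[]]; for line: if line: groups[-1].append(line) else: groups.append([])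
def pvGroupB (st : List (List String) × List String) (line : String) :
    List (List String) × List String :=
  if line ≠ "" then (st.1, st.2 ++ [line]) else (st.1 ++ [st.2], [])

-- pass 2: dict(tok.split(":") for line in g for tok in line.split())
def pvDictB (g : List String) : List (String × String) :=
  ((g.flatMap PySem.Str.split₀).foldl
    (fun d tok =>
      match PySem.Str.split? tok ":" with
      | some [k, v] => d.insert k v
      | _ => d)
    PySem.Dict.empty).items

def parse_alt (lines : List String) : List (List (String × String)) :=
  let st := lines.foldl pvGroupB ([], [])
  (st.1 ++ [st.2]).map pvDictB

-- ===== PRECONDITION & SPEC =====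
-- Pre_parse excludes exactly the inputs on which Python A raises ValueError:
-- some whitespace-separated token does not contain exactly one ':'.
def Pre_parse (lines : List String) : Prop :=
  ∀ line ∈ lines, ∀ tok ∈ PySem.Str.split₀ line, PySem.Str.count tok ":" = 1
instance (lines : List String) : Decidable (Pre_parse lines) := by unfold Pre_parse; infer_instance
def pvWitness_parse : List String := ["ecl:gry pid:860033327", "", "byr:1937 iyr:2017"]
def Spec_parse (lines : List String) (out : List (List (String × String))) : Prop := out = parse_alt lines
instance (lines : List String) (out : List (List (String × String))) : Decidable (Spec_parse lines out) := by unfold Spec_parse; infer_instance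

-- ===== CLAIM (what is proved, stated in full; the proofs are below) =====
def Claim_equal_parse : Prop := ∀ (lines : List String), Dom_parse lines → Pre_parse lines → Spec_parse lines (parse lines)

-- ===== LEMMAS AND PROOFS =====

-- the dict a block of lines produces, written with A's per-token step
def pvDictOf (g : List String) : PySem.Dict String String :=
  (g.flatMap PySem.Str.split₀).foldl pvKvA PySem.Dict.empty

theorem pvDictB_eq (g : List String) : pvDictB g = (pvDictOf g).items := rfl

theorem pvDictOf_append_singleton (g : List String) (line : String) :
    pvDictOf (g ++ [line]) = (PySem.Str.split₀ line).foldl pvKvA (pvDictOf g) := by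
  simp [pvDictOf, List.flatMap_append, List.foldl_append]

theorem pvMain (lines : List String) (gp : List (List String)) (gc : List String) :
    lines.foldl pvStepA (gp.map pvDictOf, pvDictOf gc)
    = ((lines.foldl pvGroupB (gp, gc)).1.map pvDictOf,
       pvDictOf (lines.foldl pvGroupB (gp, gc)).2) := by
  induction lines generalizing gp gc with
  | nil => rfl
  | cons line rest ih =>
    by_cases h : line = ""
    · subst h
      have h1 : pvStepA (gp.map pvDictOf, pvDictOf gc) ""
          = ((gp ++ [gc]).map pvDictOf, pvDictOf []) := by
        simp [pvStepA, pvDictOf, show PySem.Str.split₀ "" = [] from rfl]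
      have h2 : pvGroupB (gp, gc) "" = (gp ++ [gc], []) := by simp [pvGroupB]
      rw [List.foldl_cons, h1, List.foldl_cons, h2]
      exact ih (gp ++ [gc]) []
    · have h1 : pvStepA (gp.map pvDictOf, pvDictOf gc) line
          = (gp.map pvDictOf, pvDictOf (gc ++ [line])) := by
        simp [pvStepA, h, pvDictOf_append_singleton]
      have h2 : pvGroupB (gp, gc) line = (gp, gc ++ [line]) := by simp [pvGroupB, h]
      rw [List.foldl_cons, h1, List.foldl_cons, h2]
      exact ih gp (gc ++ [line])

-- ===== VERDICT (by name: the statement is the Claim_ definition above) =====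
theorem parse_spec : Claim_equal_parse := by
  intro lines _ _
  show parse lines = parse_alt lines
  unfold parse parse_alt
  have h := pvMain lines [] []
  simp only [List.map_nil] at h
  rw [show (pvDictOf [] : PySem.Dict String String) = PySem.Dict.empty from rfl] at h
  rw [h]
  simp [List.map_append, pvDictB_eq]
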